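-- pv_equiv track=rewrite | github.com/fiercezk/hs-d365fo-license-optimizer | apps/agent/src/algorithms/algorithm_2_3_role_usage_segmentation.py | _build_menu_item_to_license
-- ===== SOURCE A (Python) =====
-- def _build_menu_item_to_license(
--     license_to_menu_items: dict[str, set[str]],
-- ) -> dict[str, str]:
--     """Build reverse index: menu_item -> license_type.
--
--     When a menu item maps to multiple license types, the first encountered
--     mapping wins (deterministic because we iterate sorted keys).
--
--     Args:
--         license_to_menu_items: Forward mapping from license type to menu items.
--
--     Returns:
--         Dict mapping menu item AOTName to its license type.
--     """
--     reverse: dict[str, str] = {}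
--     for license_type in sorted(license_to_menu_items.keys()):
--         for menu_item in license_to_menu_items[license_type]:
--             if menu_item not in reverse:
--                 reverse[menu_item] = license_type
--     return reverse
-- ===== SOURCE B (Python) =====
-- def _build_menu_item_to_license(
--     license_to_menu_items: dict[str, set[str]],
-- ) -> dict[str, str]:
--     """Two-pass re-implementation: first group, per menu item, every license
--     type that contains it (iterating licenses in sorted order, so keys appear
--     in the same order as the original); then pick min(licenses) for each item.
--     """
--     candidates: dict[str, list[str]] = {}
--     for license_type in sorted(license_to_menu_items.keys()):
--         for menu_item in license_to_menu_items[license_type]: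
--             candidates.setdefault(menu_item, []).append(license_type)
--     return {menu_item: min(licenses) for menu_item, licenses in candidates.items()}
-- ===== Notes on version B (the rewrite author's own statement) =====
-- stated objective: alternative
-- what changed: Replaces the first-wins guarded single pass by a two-pass decomposition: first build an intermediate multimap menu_item -> all license types containing it, then take min(licenses) per item; no membership test against the result dict is needed.
import Mathlib
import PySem

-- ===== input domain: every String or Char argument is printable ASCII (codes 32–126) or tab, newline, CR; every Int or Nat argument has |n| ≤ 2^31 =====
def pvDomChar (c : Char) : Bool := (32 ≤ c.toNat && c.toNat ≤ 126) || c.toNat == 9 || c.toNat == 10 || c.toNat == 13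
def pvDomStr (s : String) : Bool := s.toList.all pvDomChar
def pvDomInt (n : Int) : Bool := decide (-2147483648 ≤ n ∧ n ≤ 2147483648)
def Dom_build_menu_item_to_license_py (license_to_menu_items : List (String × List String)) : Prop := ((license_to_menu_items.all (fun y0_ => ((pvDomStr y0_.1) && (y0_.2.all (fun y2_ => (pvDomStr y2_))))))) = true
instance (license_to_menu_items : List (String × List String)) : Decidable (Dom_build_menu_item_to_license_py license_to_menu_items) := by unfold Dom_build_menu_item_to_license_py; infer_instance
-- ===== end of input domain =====

-- B replaces A's guarded first-wins pass by a two-pass decomposition (group all licenses per menu item, then take the min); same cost.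


-- ===== PORT A =====
-- reverse = {}; for license_type in sorted(d.keys()): for menu_item in d[license_type]:
--   if menu_item not in reverse: reverse[menu_item] = license_type
def build_menu_item_to_license_py (license_to_menu_items : List (String × List String)) : List (String × String) :=
  let d : PySem.Dict String (List String) := PySem.Dict.ofList license_to_menu_items
  let reverse : PySem.Dict String String :=
    (PySem.List.sorted d.keys (fun k => k)).foldl
      (fun reverse license_type =>
        (d.getD license_type []).foldl
          (fun reverse menu_item =>
            if reverse.contains menu_item then reverse
            else reverse.insert menu_item license_type)
          reverse)
      PySem.Dict.empty
  reverse.items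

-- ===== PORT B =====
-- min(licenses); the `none` branch is unreachable in B: every value of `candidates` is a nonempty list
def pvMinStr (ls : List String) : String :=
  match PySem.List.min? ls (fun x => x) with
  | some m => m
  | none => ""

-- candidates = {}; for license_type in sorted(d.keys()): for menu_item in d[license_type]:
--   candidates.setdefault(menu_item, []).append(license_type)
-- return {menu_item: min(licenses) for menu_item, licenses in candidates.items()}
def build_menu_item_to_license_py_alt (license_to_menu_items : List (String × List String)) : List (String × String) :=
  let d : PySem.Dict String (List String) := PySem.Dict.ofList license_to_menu_items
  let candidates : PySem.Dict String (List String) :=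
    (PySem.List.sorted d.keys (fun k => k)).foldl
      (fun candidates license_type =>
        (d.getD license_type []).foldl
          (fun candidates menu_item =>
            candidates.modify menu_item [] (fun ls => ls ++ [license_type]))
          candidates)
      PySem.Dict.empty
  candidates.items.map (fun p => (p.1, pvMinStr p.2))

-- ===== PRECONDITION & SPEC =====
def Spec_build_menu_item_to_license_py (license_to_menu_items : List (String × List String)) (out : List (String × String)) : Prop := out = build_menu_item_to_license_py_alt license_to_menu_items
instance (license_to_menu_items : List (String × List String)) (out : List (String × String)) : Decidable (Spec_build_menu_item_to_license_py license_to_menu_items out) := by unfold Spec_build_menu_item_to_license_py; infer_instance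

-- ===== CLAIM (what is proved, stated in full; the proofs are below) =====
def Claim_equal_build_menu_item_to_license_py : Prop := ∀ (license_to_menu_items : List (String × List String)), Dom_build_menu_item_to_license_py license_to_menu_items → Spec_build_menu_item_to_license_py license_to_menu_items (build_menu_item_to_license_py license_to_menu_items)

-- ===== LEMMAS AND PROOFS =====

-- the projection relating B's grouped entries to A's entries
def pvF (p : String × List String) : String × String := (p.1, pvMinStr p.2)

-- appending a license ≥ every current one does not change the minimum
lemma pvMinStr_append (ls : List String) (lic : String) (hne : ls ≠ [])
    (hle : ∀ x ∈ ls, x ≤ lic) : pvMinStr (ls ++ [lic]) = pvMinStr ls := by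
  rcases h : PySem.List.min? ls (fun x => x) with _ | m
  · exact absurd ((PySem.List.min?_eq_none_iff ls _).mp h) hne
  · have hm : m ∈ ls := PySem.List.min?_mem h
    have h2 : PySem.List.min? (ls ++ [lic]) (fun x => x) = some m := by
      simp only [PySem.List.min?, List.foldl_append] at h ⊢
      rw [h]
      simp only [List.foldl_cons, List.foldl_nil]
      rw [if_neg (not_lt.mpr (hle m hm))]
    simp [pvMinStr, h, h2]

-- the inner loop over one license's menu items preserves the coupling invariant
lemma pvInner (lic : String) (ms : List String)
    (R : PySem.Dict String String) (C : PySem.Dict String (List String))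
    (hmap : R.items = C.items.map pvF)
    (hnd : C.keys.Nodup)
    (hv : ∀ p ∈ C.items, p.2 ≠ [] ∧ ∀ x ∈ p.2, x ≤ lic) :
    (ms.foldl (fun r mi => if r.contains mi then r else r.insert mi lic) R).items
      = (ms.foldl (fun c mi => c.modify mi [] (fun ls => ls ++ [lic])) C).items.map pvF ∧
    (ms.foldl (fun c mi => c.modify mi [] (fun ls => ls ++ [lic])) C).keys.Nodup ∧
      ∀ p ∈ (ms.foldl (fun c mi => c.modify mi [] (fun ls => ls ++ [lic])) C).items,
        p.2 ≠ [] ∧ ∀ x ∈ p.2, x ≤ lic := by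
  induction ms generalizing R C with
  | nil => exact ⟨hmap, hnd, hv⟩
  | cons mi rest ih =>
    -- one step
    have hcont : R.contains mi = C.contains mi := by
      simp only [PySem.Dict.contains, hmap, List.any_map]
      rfl
    by_cases hc : C.contains mi = true
    · -- mi already present: A keeps reverse, B appends lic to the (unique) entry
      have hR : (if R.contains mi then R else R.insert mi lic) = R := by
        rw [hcont, hc]; simp
      have hCitems : (C.modify mi [] (fun ls => ls ++ [lic])).items
          = C.items.map (fun p => if p.1 == mi then (mi, C.getD mi [] ++ [lic]) else p) := by
        simp only [PySem.Dict.modify]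
        exact PySem.Dict.items_insert_of_contains C _ hc
      have hmap' : R.items = (C.modify mi [] (fun ls => ls ++ [lic])).items.map pvF := by
        rw [hCitems, List.map_map, hmap]
        apply List.map_congr_left
        intro p hp
        by_cases he : p.1 == mi
        · have hpe : p = (p.1, p.2) := rfl
          have hg : C.getD p.1 [] = p.2 := by
            rw [hpe] at hp
            exact PySem.Dict.getD_of_mem_items C hp hnd []
          have heq : p.1 = mi := by simpa using he
          obtain ⟨hne, hle⟩ := hv p hp
          simp only [Function.comp, he, if_pos]
          rw [← heq, hg, pvF, pvF, pvMinStr_append p.2 lic hne hle, heq]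
        · simp [Function.comp, he]
      have hnd' : (C.modify mi [] (fun ls => ls ++ [lic])).keys.Nodup := by
        simp only [PySem.Dict.modify]
        exact PySem.Dict.nodup_keys_insert C _ _ hnd
      have hv' : ∀ p ∈ (C.modify mi [] (fun ls => ls ++ [lic])).items,
          p.2 ≠ [] ∧ ∀ x ∈ p.2, x ≤ lic := by
        rw [hCitems]
        intro p hp
        obtain ⟨q, hq, hqe⟩ := List.mem_map.mp hp
        by_cases he : q.1 == mi
        · have hg : C.getD q.1 [] = q.2 :=
            PySem.Dict.getD_of_mem_items C hq hnd []
          have heq : q.1 = mi := by simpa using he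
          obtain ⟨hne, hle⟩ := hv q hq
          rw [← hqe]
          simp only [he, if_pos]
          constructor
          · rw [← heq, hg]; simp
          · intro x hx
            rw [← heq, hg] at hx
            rcases List.mem_append.mp hx with h1 | h1
            · exact hle x h1
            · simp only [List.mem_singleton] at h1
              subst h1; exact le_refl _
        · rw [← hqe, if_neg he]
          exact hv q hq
      simpa only [List.foldl_cons, hR] using ih _ _ hmap' hnd' hv'
    · -- mi new: both append an entry
      have hcf : C.contains mi = false := by simpa using hc
      have hR : (if R.contains mi then R else R.insert mi lic) = R.insert mi lic := by
        rw [hcont, hcf]; simp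
      have hRc : R.contains mi = false := by rw [hcont, hcf]
      have hRitems : (R.insert mi lic).items = R.items ++ [(mi, lic)] :=
        PySem.Dict.items_insert_of_not_contains R lic hRc
      have hgd : C.getD mi [] = [] := PySem.Dict.getD_of_not_contains C [] hcf
      have hCitems : (C.modify mi [] (fun ls => ls ++ [lic])).items
          = C.items ++ [(mi, [lic])] := by
        simp only [PySem.Dict.modify, hgd]
        exact PySem.Dict.items_insert_of_not_contains C _ hcf
      have hmap' : (R.insert mi lic).items
          = (C.modify mi [] (fun ls => ls ++ [lic])).items.map pvF := by
        rw [hRitems, hCitems, List.map_append, hmap]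
        rfl
      have hnd' : (C.modify mi [] (fun ls => ls ++ [lic])).keys.Nodup := by
        simp only [PySem.Dict.modify]
        exact PySem.Dict.nodup_keys_insert C _ _ hnd
      have hv' : ∀ p ∈ (C.modify mi [] (fun ls => ls ++ [lic])).items,
          p.2 ≠ [] ∧ ∀ x ∈ p.2, x ≤ lic := by
        rw [hCitems]
        intro p hp
        rcases List.mem_append.mp hp with h1 | h1
        · exact hv p h1
        · simp only [List.mem_singleton] at h1
          subst h1
          refine ⟨by simp, ?_⟩
          intro x hx
          simp only [List.mem_singleton] at hx
          subst hx; exact le_refl _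
      simpa only [List.foldl_cons, hR] using ih _ _ hmap' hnd' hv'

-- the outer loop over the ascending license keys preserves the coupling invariant
lemma pvOuter (d : PySem.Dict String (List String)) (ks : List String)
    (R : PySem.Dict String String) (C : PySem.Dict String (List String))
    (hks : ks.Pairwise (· ≤ ·))
    (hmap : R.items = C.items.map pvF)
    (hnd : C.keys.Nodup)
    (hv : ∀ p ∈ C.items, p.2 ≠ [] ∧ ∀ x ∈ p.2, ∀ k ∈ ks, x ≤ k) :
    (ks.foldl (fun r lic => (d.getD lic []).foldl
        (fun r mi => if r.contains mi then r else r.insert mi lic) r) R).items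
    = (ks.foldl (fun c lic => (d.getD lic []).foldl
        (fun c mi => c.modify mi [] (fun ls => ls ++ [lic])) c) C).items.map pvF := by
  induction ks generalizing R C with
  | nil => simpa using hmap
  | cons lic rest ih =>
    have hks' : rest.Pairwise (· ≤ ·) := (List.pairwise_cons.mp hks).2
    have hlic : ∀ k ∈ rest, lic ≤ k := (List.pairwise_cons.mp hks).1
    have hv0 : ∀ p ∈ C.items, p.2 ≠ [] ∧ ∀ x ∈ p.2, x ≤ lic := by
      intro p hp
      exact ⟨(hv p hp).1, fun x hx => (hv p hp).2 x hx lic (by simp)⟩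
    obtain ⟨hmap', hnd', hv'⟩ := pvInner lic (d.getD lic []) R C hmap hnd hv0
    simp only [List.foldl_cons]
    apply ih _ _ hks' hmap' hnd'
    intro p hp
    refine ⟨(hv' p hp).1, ?_⟩
    intro x hx k hk
    -- every stored license is ≤ lic (inner invariant), and lic ≤ every later key
    exact le_trans ((hv' p hp).2 x hx) (hlic k hk)

-- ===== VERDICT (by name: the statement is the Claim_ definition above) =====
theorem build_menu_item_to_license_py_spec : Claim_equal_build_menu_item_to_license_py := by
  intro license_to_menu_items _
  unfold Spec_build_menu_item_to_license_py
  unfold build_menu_item_to_license_py build_menu_item_to_license_py_alt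
  apply pvOuter
  · exact PySem.List.sorted_pairwise _ _
  · rfl
  · exact PySem.Dict.nodup_keys_empty
  · intro p hp; exact absurd hp (by simp [PySem.Dict.empty])
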